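-- pv_equiv track=rewrite | github.com/rokkish/unsupervised_trajectory_segmentation | my_util/sec_argmax.py | get_idx_samelabel
-- ===== SOURCE A (Python) =====
-- def get_idx_samelabel(target):
--     """ Vanish Reusing Same Label """
--     count = 0
--     now_label = target[0]
--     target_idx = []
--     queue_label = []
--     for i, t in enumerate(target):
--         if t != now_label:
--             queue_label.extend([t])
--             now_label = t
--             count += 1
--         if count >= 2:
--             if t in queue_label[:-1]:
--                 target_idx.extend([i])
--     return target_idx
-- ===== SOURCE B (Python) =====
-- def get_idx_samelabel(target):
--     """ Vanish Reusing Same Label """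
--     # first pass: group consecutive equal labels into runs of (label, indices)
--     runs = []
--     now = target[0]
--     cur = [0]
--     for i in range(1, len(target)):
--         t = target[i]
--         if t == now:
--             cur.append(i)
--         else:
--             runs.append((now, cur))
--             now = t
--             cur = [i]
--     runs.append((now, cur))
--     # second pass: a run's indices are collected when its label was already seen
--     # among earlier runs (the very first run's label is never added to seen)
--     res = []
--     seen = set()
--     for k, (lab, idxs) in enumerate(runs):
--         if k >= 2 and lab in seen:
--             res += idxs
--         if k >= 1:
--             seen.add(lab)
--     return res
-- ===== Notes on version B (the rewrite author's own statement) =====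
-- stated objective: faster
-- what changed: A's single loop that rescans a growing queue of run labels per element is replaced by a two-pass decomposition: group the list into runs of consecutive equal labels, then scan the runs once with a set of already-seen labels.
import Mathlib
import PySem

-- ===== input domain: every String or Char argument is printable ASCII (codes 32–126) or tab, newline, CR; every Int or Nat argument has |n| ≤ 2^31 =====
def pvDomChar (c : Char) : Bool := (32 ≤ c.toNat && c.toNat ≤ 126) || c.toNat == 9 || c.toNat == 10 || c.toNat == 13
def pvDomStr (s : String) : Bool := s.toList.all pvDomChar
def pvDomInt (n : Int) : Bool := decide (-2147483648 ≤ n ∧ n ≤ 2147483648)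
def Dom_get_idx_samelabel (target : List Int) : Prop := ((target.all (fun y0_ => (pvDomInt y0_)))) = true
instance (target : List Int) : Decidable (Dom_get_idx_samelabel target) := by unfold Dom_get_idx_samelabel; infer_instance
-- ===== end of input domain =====

-- B re-implements get_idx_samelabel with a different decomposition: one pass grouping the list into
-- runs of equal labels, then a scan over the runs with a seen-set, instead of A's single loop that
-- rescans a growing label queue per element (objective: alternative).


-- ===== PORT A =====
-- A-side helper: the body of A's for-loop; state = (count, now_label, target_idx, queue_label)
def pvStepA (st : Int × Int × List Int × List Int) (p : Int × Int) : Int × Int × List Int × List Int :=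
  let (count, now_label, target_idx, queue_label) := st
  let (i, t) := p
  let (count, now_label, queue_label) :=
    if t ≠ now_label then (count + 1, t, queue_label ++ [t]) else (count, now_label, queue_label)
  let target_idx :=
    if 2 ≤ count then
      (if t ∈ PySem.List.slice queue_label none (some (-1)) then target_idx ++ [i] else target_idx)
    else target_idx
  (count, now_label, target_idx, queue_label)

def get_idx_samelabel (target : List Int) : List Int :=
  let now_label := (PySem.List.pyGet? target 0).getD 0   -- first element; the IndexError on the empty list is excluded by Pre_
  ((PySem.List.enumerate target 0).foldl pvStepA (0, now_label, [], [])).2.2.1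

-- ===== PORT B =====
-- B-side helper: first pass, grouping consecutive equal labels; state = (now, cur, runs)
def pvStepRun (target : List Int) (st : Int × List Int × List (Int × List Int)) (i : Int) :
    Int × List Int × List (Int × List Int) :=
  let (now, cur, runs) := st
  let t := PySem.List.pyGetD target i 0
  if t = now then (now, cur ++ [i], runs)
  else (t, [i], runs ++ [(now, cur)])

-- B-side helper: the body of B's second loop; state = (res, seen)
def pvStepSeen (st : List Int × PySem.Set Int) (p : Int × Int × List Int) : List Int × PySem.Set Int :=
  let (res, seen) := st
  let (k, lab, idxs) := p
  let res := if 2 ≤ k ∧ PySem.Set.contains seen lab then res ++ idxs else res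
  let seen := if 1 ≤ k then PySem.Set.add seen lab else seen
  (res, seen)

-- B-side helper: the second pass over the run list
def pvSecond (runs : List (Int × List Int)) : List Int × PySem.Set Int :=
  (PySem.List.enumerate runs 0).foldl pvStepSeen ([], PySem.Set.empty)

def get_idx_samelabel_alt (target : List Int) : List Int :=
  let now0 := (PySem.List.pyGet? target 0).getD 0   -- first element; the IndexError on the empty list is excluded by Pre_
  let st := (PySem.List.pyRange 1 (target.length : Int) 1).foldl (pvStepRun target) (now0, [0], [])
  (pvSecond (st.2.2 ++ [(st.1, st.2.1)])).1

-- ===== PRECONDITION & SPEC =====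
-- A (and B alike) raise IndexError reading the first element of the empty input list; Pre_ excludes exactly that input.
def Pre_get_idx_samelabel (target : List Int) : Prop := target ≠ []
instance (target : List Int) : Decidable (Pre_get_idx_samelabel target) := by
  unfold Pre_get_idx_samelabel; infer_instance
def pvWitness_get_idx_samelabel : List Int := [1, 2, 1, 2]

def Spec_get_idx_samelabel (target : List Int) (out : List Int) : Prop := out = get_idx_samelabel_alt target
instance (target : List Int) (out : List Int) : Decidable (Spec_get_idx_samelabel target out) := by unfold Spec_get_idx_samelabel; infer_instance

-- ===== CLAIM (what is proved, stated in full; the proofs are below) =====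
def Claim_equal_get_idx_samelabel : Prop := ∀ (target : List Int), Dom_get_idx_samelabel target → Pre_get_idx_samelabel target → Spec_get_idx_samelabel target (get_idx_samelabel target)

-- ===== LEMMAS AND PROOFS =====

-- proof-side helper: pvStepRun with the element value supplied directly as part of the pair
def pvStepRunP (st : Int × List Int × List (Int × List Int)) (p : Int × Int) :
    Int × List Int × List (Int × List Int) :=
  let (now, cur, runs) := st
  if p.2 = now then (now, cur ++ [p.1], runs)
  else (p.2, [p.1], runs ++ [(now, cur)])

-- appending one run extends pvSecond by one pvStepSeen step at index rs.length
theorem pvSecond_append (rs : List (Int × List Int)) (r : Int × List Int) :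
    pvSecond (rs ++ [r]) = pvStepSeen (pvSecond rs) ((rs.length : Int), r) := by
  simp [pvSecond, PySem.List.enumerate_append, List.foldl_append, PySem.List.enumerate_cons,
    PySem.List.enumerate_nil]

-- the seen-set after the second pass is the set of labels of all runs but the first
theorem pvSecond_seen (rs : List (Int × List Int)) :
    (pvSecond rs).2 = PySem.Set.ofList ((rs.map Prod.fst).tail) := by
  induction rs using List.reverseRecOn with
  | nil => simp [pvSecond, PySem.List.enumerate_nil, PySem.Set.ofList, PySem.Set.empty]
  | append_singleton rs r ih =>
    rw [pvSecond_append, pvStepSeen]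
    rcases rs with _ | ⟨a, rs'⟩
    · simp [pvSecond, PySem.List.enumerate_nil, PySem.Set.ofList, PySem.Set.empty]
    · simp only [ih]
      have h1 : (1:Int) ≤ ((a :: rs').length : Int) := by simp
      simp only [if_pos h1]
      simp [PySem.Set.ofList_eq_foldl, List.foldl_append]

-- B's first pass over range(1, len) with indexing equals a fold over the enumerated tail
theorem pvRangeFold (t0 : Int) (tail : List Int) (st : Int × List Int × List (Int × List Int)) :
    (PySem.List.pyRange 1 (((t0 :: tail).length : Nat) : Int) 1).foldl (pvStepRun (t0 :: tail)) st
      = (PySem.List.enumerate tail 1).foldl pvStepRunP st := by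
  have hlen : (((t0 :: tail).length : Nat) : Int) = 1 + (tail.length : Int) := by
    simp
    omega
  rw [hlen, ← PySem.List.map_fst_enumerate tail 1, List.foldl_map]
  apply PySem.List.foldl_congr_mem
  intro acc p hp
  rcases (PySem.List.mem_enumerate_iff _ _ _).1 hp with ⟨k, hk, rfl⟩
  have : PySem.List.pyGetD (t0 :: tail) (1 + (k : Int)) 0 = tail[k] := by
    have : (1 + (k : Int)) = (((k + 1 : Nat) : Int)) := by push_cast; ring
    rw [this, PySem.List.pyGetD_natCast]
    simp [List.getD, hk]
  simp [pvStepRun, pvStepRunP, this]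

-- the A-state that B's first-pass state (now, cur, runs) determines
def pvInv (now : Int) (cur : List Int) (runs : List (Int × List Int)) : Int × Int × List Int × List Int :=
  ((runs.length : Int), now, (pvSecond (runs ++ [(now, cur)])).1, ((runs.map Prod.fst) ++ [now]).tail)

-- A's membership test equals B's seen-set test
theorem pvCondIff (runs : List (Int × List Int)) (t : Int) :
    ((2:Int) ≤ (runs.length : Int) ∧ PySem.Set.contains (pvSecond runs).2 t = true) ↔
    (2 ≤ runs.length ∧ t ∈ (runs.map Prod.fst).tail) := by
  rw [pvSecond_seen]
  constructor
  · rintro ⟨h1, h2⟩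
    refine ⟨by exact_mod_cast h1, ?_⟩
    have := (List.contains_iff_mem).1 h2
    exact (PySem.Set.mem_ofList _ _).1 this
  · rintro ⟨h1, h2⟩
    refine ⟨by exact_mod_cast h1, ?_⟩
    exact (List.contains_iff_mem).2 ((PySem.Set.mem_ofList _ _).2 h2)

-- closed form for the result component of pvSecond after appending a run
theorem pvTidx (runs : List (Int × List Int)) (t : Int) (c : List Int) :
    (pvSecond (runs ++ [(t, c)])).1 =
      if 2 ≤ runs.length ∧ t ∈ (runs.map Prod.fst).tail
      then (pvSecond runs).1 ++ c else (pvSecond runs).1 := by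
  rw [pvSecond_append, pvStepSeen]
  simp only []
  rw [if_congr (pvCondIff runs t) rfl rfl]

-- one loop step of A simulates one loop step of B's first pass
theorem pvStep_sim (now t i : Int) (cur : List Int) (runs : List (Int × List Int)) :
    pvStepA (pvInv now cur runs) (i, t)
      = pvInv (pvStepRunP (now, cur, runs) (i, t)).1
              (pvStepRunP (now, cur, runs) (i, t)).2.1
              (pvStepRunP (now, cur, runs) (i, t)).2.2 := by
  by_cases h : t = now
  · subst h
    have hB : pvStepRunP (t, cur, runs) (i, t) = (t, cur ++ [i], runs) := by
      simp [pvStepRunP]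
    rw [hB]
    show pvStepA (pvInv t cur runs) (i, t) = pvInv t (cur ++ [i]) runs
    rw [pvStepA, pvInv, pvInv]
    simp only [if_neg (by simp : ¬ t ≠ t), PySem.List.slice_to_neg_one]
    have hq : (((runs.map Prod.fst) ++ [t]).tail).dropLast = (runs.map Prod.fst).tail := by
      rcases runs with _ | ⟨a, rs⟩ <;> simp
    rw [hq, pvTidx, pvTidx]
    have h2 : ((2:Int) ≤ (runs.length : Int)) ↔ 2 ≤ runs.length := by exact_mod_cast Iff.rfl
    refine Prod.ext rfl (Prod.ext rfl (Prod.ext ?_ rfl))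
    by_cases hc2 : 2 ≤ runs.length
    · by_cases hc3 : t ∈ (runs.map Prod.fst).tail
      · simp [h2.mpr hc2, hc2, hc3, List.append_assoc]
      · simp [h2.mpr hc2, hc2, hc3]
    · simp [hc2, (h2.not).mpr hc2]
  · have hB : pvStepRunP (now, cur, runs) (i, t) = (t, [i], runs ++ [(now, cur)]) := by
      simp [pvStepRunP, h]
    rw [hB]
    show pvStepA (pvInv now cur runs) (i, t) = pvInv t [i] (runs ++ [(now, cur)])
    rw [pvStepA, pvInv, pvInv]
    simp only [if_pos (by simpa using h : t ≠ now), PySem.List.slice_to_neg_one,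
      List.dropLast_concat]
    have hq : ((runs.map Prod.fst) ++ [now]).tail ++ [t]
        = (((runs ++ [(now, cur)]).map Prod.fst) ++ [t]).tail := by
      rcases runs with _ | ⟨a, rs⟩ <;> simp
    have hlen : (runs.length : Int) + 1 = (((runs ++ [(now, cur)]).length : Nat) : Int) := by
      simp
    have hmem : t ∈ ((runs ++ [(now, cur)]).map Prod.fst).tail ↔
        t ∈ ((runs.map Prod.fst) ++ [now]).tail := by
      rcases runs with _ | ⟨a, rs⟩ <;> simp
    have h2 : ((2:Int) ≤ (runs.length : Int) + 1) ↔ 2 ≤ (runs ++ [(now, cur)]).length := by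
      rw [hlen]; exact_mod_cast Iff.rfl
    refine Prod.ext hlen (Prod.ext rfl (Prod.ext ?_ hq))
    rw [pvTidx (runs ++ [(now, cur)]) t [i], if_congr (and_congr_right fun _ => hmem) rfl rfl]
    by_cases hc2 : 2 ≤ (runs ++ [(now, cur)]).length
    · have hne : runs ≠ [] := by
        intro he
        subst he
        simp at hc2
      have h1 : 1 ≤ runs.length := List.length_pos_of_ne_nil hne
      by_cases hc3 : t ∈ ((runs.map Prod.fst) ++ [now]).tail
      · simp [h2.mpr hc2, hc3, h1]
      · simp [h2.mpr hc2, hc3, h1]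
    · have hne : runs = [] := by
        rcases runs with _ | ⟨a, rs⟩
        · rfl
        · exfalso
          apply hc2
          simp
      subst hne
      simp

-- the simulation extended along the whole stream of (index, value) pairs
theorem pvMain (zs : List (Int × Int)) (now : Int) (cur : List Int) (runs : List (Int × List Int)) :
    (zs.foldl pvStepA (pvInv now cur runs)).2.2.1
      = (pvSecond
          ((zs.foldl pvStepRunP (now, cur, runs)).2.2
            ++ [((zs.foldl pvStepRunP (now, cur, runs)).1,
                 (zs.foldl pvStepRunP (now, cur, runs)).2.1)])).1 := by
  induction zs generalizing now cur runs with
  | nil => rfl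
  | cons p zs ih =>
    obtain ⟨i, t⟩ := p
    rw [List.foldl_cons, List.foldl_cons, pvStep_sim]
    exact ih _ _ _

theorem pv_equal (target : List Int) (h : target ≠ []) :
    get_idx_samelabel target = get_idx_samelabel_alt target := by
  obtain ⟨t0, tail, rfl⟩ := List.exists_cons_of_ne_nil h
  rw [get_idx_samelabel, get_idx_samelabel_alt]
  have hget : (PySem.List.pyGet? (t0 :: tail) 0).getD 0 = t0 := by
    simp [PySem.List.pyGet?, PySem.List.pyIdx?]
  simp only [hget]
  rw [pvRangeFold]
  have hfirst : pvStepA (0, t0, [], []) (0, t0) = (0, t0, [], []) := by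
    rw [pvStepA]
    norm_num
  rw [PySem.List.enumerate_cons, List.foldl_cons, hfirst]
  have hinv : ((0 : Int), t0, ([] : List Int), ([] : List Int)) = pvInv t0 [0] [] := rfl
  rw [hinv, pvMain]
  norm_num

-- ===== VERDICT (by name: the statement is the Claim_ definition above) =====
theorem get_idx_samelabel_spec : Claim_equal_get_idx_samelabel := by
  intro target _ hpre
  exact pv_equal target hpre
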